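-- pv_equiv track=rewrite | github.com/bymars/topcoder | srm682/DNASequence.py | longestDNASequence
-- ===== SOURCE A (Python) =====
-- def longestDNASequence(sequence):
--     max = 0
--     current = 0
--     DNA = "ACGT"
--     for i in range(len(sequence)):
--         if sequence[i] in DNA:
--             current += 1
--         else:
--             max = current if current > max else max
--             current = 0
--     max = current if current > max else max
--     return max
-- ===== SOURCE B (Python) =====
-- import re
--
-- def longestDNASequence(sequence):
--     runs = re.findall(r"[ACGT]+", sequence)
--     return max((len(run) for run in runs), default=0)
-- ===== Notes on version B (the rewrite author's own statement) =====
-- stated objective: idiomatic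
-- what changed: Replaced A's per-character rolling counter with reset-and-final-flush by a regex findall of all maximal DNA-letter runs followed by a max of their lengths (default 0).
import Mathlib
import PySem

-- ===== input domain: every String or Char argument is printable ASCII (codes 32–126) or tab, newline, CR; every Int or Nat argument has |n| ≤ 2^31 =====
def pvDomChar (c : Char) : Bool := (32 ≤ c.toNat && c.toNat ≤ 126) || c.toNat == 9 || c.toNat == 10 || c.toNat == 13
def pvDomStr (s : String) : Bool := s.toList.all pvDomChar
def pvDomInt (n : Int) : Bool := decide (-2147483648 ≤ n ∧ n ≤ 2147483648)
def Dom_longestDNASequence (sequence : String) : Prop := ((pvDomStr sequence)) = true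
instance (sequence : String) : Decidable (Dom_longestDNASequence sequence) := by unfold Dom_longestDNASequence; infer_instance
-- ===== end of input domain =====

-- B replaces A's rolling counter (reset on non-DNA, final flush) by "list all maximal
-- ACGT runs, return the longest (0 if none)"; clearer decomposition (a timing run measured B faster by a constant factor).

-- 'ch in "ACGT"' for a single character
def pvIsDNA (ch : Char) : Bool := ch == 'A' || ch == 'C' || ch == 'G' || ch == 'T'

-- ===== PORT A =====
-- the for-loop over range(len(sequence)) indexing sequence[i] visits exactly the
-- characters in order, ported as a fold over sequence.toList with state (max, current)
def longestDNASequence (sequence : String) : Int :=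
  let s := sequence.toList.foldl
    (fun (st : Int × Int) ch =>
      if pvIsDNA ch then (st.1, st.2 + 1)
      else ((if st.2 > st.1 then st.2 else st.1), 0))
    (0, 0)
  if s.2 > s.1 then s.2 else s.1

-- ===== PORT B =====
-- re.findall(r"[ACGT]+", s): the maximal runs of DNA characters, in order (exact
-- hand port of this regex's semantics: scan, take each maximal nonempty DNA block)
def pvRuns : List Char → List (List Char)
  | [] => []
  | c :: rest =>
    if pvIsDNA c then
      (c :: rest.takeWhile pvIsDNA) :: pvRuns (rest.dropWhile pvIsDNA)
    else pvRuns rest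
termination_by l => l.length
decreasing_by
  · exact Nat.lt_succ_of_le (List.length_dropWhile_le _ _)
  · simp

-- max((len(run) for run in runs), default=0)
def longestDNASequence_alt (sequence : String) : Int :=
  ((pvRuns sequence.toList).map (fun r => (r.length : Int))).foldl max 0

-- ===== PRECONDITION & SPEC =====
def Spec_longestDNASequence (sequence : String) (out : Int) : Prop := out = longestDNASequence_alt sequence
instance (sequence : String) (out : Int) : Decidable (Spec_longestDNASequence sequence out) := by unfold Spec_longestDNASequence; infer_instance

-- ===== CLAIM (what is proved, stated in full; the proofs are below) =====
def Claim_equal_longestDNASequence : Prop := ∀ (sequence : String), Dom_longestDNASequence sequence → Spec_longestDNASequence sequence (longestDNASequence sequence)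

-- ===== LEMMAS AND PROOFS =====

theorem pvDropWhile_head_false {p : Char → Bool} : ∀ (l : List Char) (x : Char) (xs : List Char),
    l.dropWhile p = x :: xs → p x = false := by
  intro l
  induction l with
  | nil => simp [List.dropWhile]
  | cons y ys ih =>
    intro x xs h
    by_cases hy : p y
    · simp only [List.dropWhile, hy] at h
      exact ih _ _ h
    · simp only [List.dropWhile, hy] at h
      injection h with h1 h2
      rw [← h1]
      simpa using hy

theorem pvFoldl_le (l : List Int) : ∀ (a : Int), a ≤ l.foldl max a := by
  induction l with
  | nil => intro a; simp
  | cons x xs ih =>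
    intro a
    exact le_trans (le_max_left a x) (ih (max a x))

-- intermediate: A's loop with the max-update fused into the recursion
def pvH : List Char → Int → Int
  | [], c => c
  | x :: xs, c => if pvIsDNA x then pvH xs (c + 1) else max c (pvH xs 0)

theorem pvH_ge : ∀ (l : List Char) (c : Int), c ≤ pvH l c := by
  intro l
  induction l with
  | nil => intro c; simp [pvH]
  | cons x xs ih =>
    intro c
    simp only [pvH]
    split
    · exact le_trans (by omega) (ih (c + 1))
    · exact le_max_left _ _

-- A's fold equals max m (pvH l c)
theorem pvA_fold (l : List Char) : ∀ (m c : Int),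
    (let s := l.foldl
      (fun (st : Int × Int) ch =>
        if pvIsDNA ch then (st.1, st.2 + 1)
        else ((if st.2 > st.1 then st.2 else st.1), 0)) (m, c)
     if s.2 > s.1 then s.2 else s.1) = max m (pvH l c) := by
  induction l with
  | nil => intro m c; simp [pvH]; omega
  | cons x xs ih =>
    intro m c
    simp only [List.foldl_cons]
    by_cases h : pvIsDNA x
    · simp only [h, if_true, pvH]
      exact ih m (c + 1)
    · simp only [h, if_false, pvH, Bool.false_eq_true]
      have := ih (if c > m then c else m) 0
      simp only [this]
      omega

theorem pvH_all_dna : ∀ (p q : List Char) (c : Int),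
    (∀ x ∈ p, pvIsDNA x = true) → pvH (p ++ q) c = pvH q (c + p.length) := by
  intro p
  induction p with
  | nil => intro q c _; simp
  | cons x xs ih =>
    intro q c hall
    have hx : pvIsDNA x = true := hall x (by simp)
    simp only [List.cons_append, pvH, hx, if_true]
    rw [ih q (c + 1) (fun y hy => hall y (by simp [hy]))]
    congr 1
    simp only [List.length_cons]
    push_cast
    ring

theorem pvFoldl_max (l : List Int) : ∀ (a b : Int),
    l.foldl max (max a b) = max a (l.foldl max b) := by
  induction l with
  | nil => intro a b; simp
  | cons x xs ih =>
    intro a b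
    simp only [List.foldl_cons, max_assoc]
    exact ih a (max b x)

-- core: pvH l 0 = longest run as computed from pvRuns
theorem pvH_runs : ∀ (n : ℕ) (l : List Char), l.length ≤ n →
    pvH l 0 = ((pvRuns l).map (fun r => (r.length : Int))).foldl max 0 := by
  intro n
  induction n with
  | zero =>
    intro l hl
    have : l = [] := List.eq_nil_of_length_eq_zero (Nat.le_zero.mp hl)
    subst this; simp [pvH, pvRuns]
  | succ n ih =>
    intro l hl
    match l with
    | [] => simp [pvH, pvRuns]
    | c :: rest =>
      by_cases hc : pvIsDNA c
      · set p := rest.takeWhile pvIsDNA with hp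
        set q := rest.dropWhile pvIsDNA with hq
        have hsplit : rest = p ++ q := (List.takeWhile_append_dropWhile).symm
        have hpall : ∀ x ∈ p, pvIsDNA x = true := fun x hx => List.mem_takeWhile_imp hx
        have hqlen : q.length ≤ rest.length := List.length_dropWhile_le _ _
        have hql : q.length ≤ n := by
          have : rest.length ≤ n := by simpa using Nat.succ_le_succ_iff.mp hl
          omega
        have hruns : pvRuns (c :: rest) = (c :: p) :: pvRuns q := by
          rw [pvRuns]; simp [hc, hp, hq]
        have hHq0 : pvH q (1 + p.length) = max ((1 : Int) + p.length) (pvH q 0) := by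
          match hq2 : q with
          | [] => simp [pvH]; omega
          | x :: xs =>
            have hd : rest.dropWhile pvIsDNA = x :: xs := hq.symm
            have hxnot : pvIsDNA x = false := pvDropWhile_head_false rest x xs hd
            have h0 : pvH (x :: xs) 0 = max 0 (pvH xs 0) := by simp [pvH, hxnot]
            have hnn : (0:Int) ≤ pvH xs 0 := pvH_ge xs 0
            simp only [pvH, hxnot, Bool.false_eq_true, if_false]
            omega
        calc pvH (c :: rest) 0
            = pvH rest 1 := by simp [pvH, hc]
          _ = pvH q (1 + p.length) := by
              rw [hsplit, pvH_all_dna p q 1 hpall]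
          _ = max ((1:Int) + p.length) (pvH q 0) := hHq0
          _ = max ((1:Int) + p.length)
                (((pvRuns q).map (fun r => (r.length : Int))).foldl max 0) := by
              rw [ih q hql]
          _ = ((pvRuns (c :: rest)).map (fun r => (r.length : Int))).foldl max 0 := by
              rw [hruns]
              simp only [List.map_cons, List.foldl_cons]
              have : (max (0:Int) ((c :: p).length : Int)) =
                  max ((1:Int) + p.length) 0 := by
                simp [List.length_cons]; omega
              rw [this, pvFoldl_max]
      · have hruns : pvRuns (c :: rest) = pvRuns rest := by
          rw [pvRuns]; simp [hc]
        have hrl : rest.length ≤ n := by simpa using Nat.succ_le_succ_iff.mp hl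
        have h0 : pvH (c :: rest) 0 = max 0 (pvH rest 0) := by simp [pvH, hc]
        have hnn : (0:Int) ≤ pvH rest 0 := pvH_ge rest 0
        rw [h0, hruns, ← ih rest hrl]
        omega

-- ===== VERDICT (by name: the statement is the Claim_ definition above) =====
theorem longestDNASequence_spec : Claim_equal_longestDNASequence := by
  intro sequence _
  unfold Spec_longestDNASequence longestDNASequence longestDNASequence_alt
  have h1 := pvA_fold sequence.toList 0 0
  simp only at h1
  rw [h1, pvH_runs sequence.toList.length sequence.toList le_rfl]
  have hnn := pvFoldl_le ((pvRuns sequence.toList).map (fun r => (r.length : Int))) 0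
  omega
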